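-- pv_equiv track=rewrite | github.com/Cloudy17g35/Codewars-solutions | solve.py | solve
-- ===== SOURCE A (Python) =====
-- def is_prime(n):
--
--     """
--     Assumes that n is a positive natural number
--     """
--     # We know 1 is not a prime number
--     if n == 1:
--         return False
--
--     # We store the number of factors in this variable
--     factors = 0
--     # This will loop from 1 to n
--     for i in range(1, n+1):
--         # Check if `i` divides `n`, if yes then we increment the factors
--         if n % i == 0:
--             factors += 1
--     # If total factors are exactly 2
--     if factors == 2:
--         return True
--     return False
--
-- def solve(a,b):
--     factors: list = []
--
--     for i in range(1, b + 1):
--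
--         if b % i == 0:
--             factors.append(i)
--     prime_factors = [factor for factor in factors if is_prime(factor)]
--
--     for factor in prime_factors:
--         if a % factor:
--             return False
--     return True
-- ===== SOURCE B (Python) =====
-- def _gcd(x, y):
--     while y:
--         x, y = y, x % y
--     return x
--
--
-- def solve(a, b):
--     # Every prime factor of b must divide a: repeatedly strip gcd(a, b) from b.
--     while b > 1:
--         g = _gcd(abs(a), b)
--         if g == 1:
--             return False
--         b //= g
--     return True
-- ===== Notes on version B (the rewrite author's own statement) =====
-- stated objective: faster
-- what changed: Replaces enumerating every divisor of b and testing each for primality by counting its divisors (two nested O(b) scans) with a gcd loop that repeatedly divides b by gcd(|a|,b), never factorizing at all.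
import Mathlib
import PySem

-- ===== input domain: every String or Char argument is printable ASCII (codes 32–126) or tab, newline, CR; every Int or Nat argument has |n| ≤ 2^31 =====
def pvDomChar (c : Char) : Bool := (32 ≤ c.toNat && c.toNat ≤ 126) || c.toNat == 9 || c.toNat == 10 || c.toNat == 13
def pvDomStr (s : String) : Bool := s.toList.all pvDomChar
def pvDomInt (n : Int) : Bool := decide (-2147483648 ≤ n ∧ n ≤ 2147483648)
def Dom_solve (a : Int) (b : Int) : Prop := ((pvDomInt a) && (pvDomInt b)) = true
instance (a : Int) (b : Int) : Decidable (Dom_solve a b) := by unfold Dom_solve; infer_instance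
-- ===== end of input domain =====

-- B replaces A's full divisor enumeration + per-divisor primality counting with a gcd loop
-- that repeatedly divides b by gcd(|a|, b); measurably faster (asymptotic change).


-- ===== PORT A =====
-- is_prime(n): counts the divisors of n in range(1, n+1); prime iff exactly 2.
def is_prime (n : Int) : Bool :=
  if n == 1 then false
  else
    let factors : Int := (PySem.List.pyRange 1 (n+1) 1).foldl
      (fun acc i => if PySem.Int.mod n i == 0 then acc + 1 else acc) 0
    if factors == 2 then true else false

-- the final 'for factor in prime_factors: if a % factor: return False / return True' loop
def solveLoop (a : Int) : List Int → Bool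
  | [] => true
  | f :: rest => if PySem.Int.mod a f ≠ 0 then false else solveLoop a rest

def solve (a : Int) (b : Int) : Bool :=
  let factors : List Int := (PySem.List.pyRange 1 (b+1) 1).foldl
    (fun acc i => if PySem.Int.mod b i == 0 then acc ++ [i] else acc) []
  let prime_factors := factors.filter is_prime
  solveLoop a prime_factors

-- ===== PORT B =====
-- _gcd(x, y): Euclid's loop from Source B
def gcdLoop (x y : Nat) : Nat :=
  if h : y = 0 then x else gcdLoop y (x % y)
termination_by y
decreasing_by exact Nat.mod_lt _ (Nat.pos_of_ne_zero h)

-- port cites this for termination of solve_alt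
theorem gcdLoop_eq (x y : Nat) : gcdLoop x y = Nat.gcd y x := by
  induction x, y using gcdLoop.induct with
  | case1 x => simp [gcdLoop]
  | case2 x y h ih =>
    rw [gcdLoop, dif_neg h, ih]; exact (Nat.gcd_rec y x).symm

theorem solve_alt_dec (a b : Int) (hb : 1 < b)
    (hg : ¬ ((gcdLoop a.natAbs b.natAbs : Nat) : Int) = 1) :
    (PySem.Int.floordiv b ((gcdLoop a.natAbs b.natAbs : Nat) : Int)).toNat < b.toNat := by
  rw [gcdLoop_eq] at *
  set G := Nat.gcd b.natAbs a.natAbs with hG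
  have hdvd : G ∣ b.natAbs := Nat.gcd_dvd_left _ _
  have hb0 : b.natAbs ≠ 0 := by omega
  have hGpos : 0 < G := Nat.pos_of_ne_zero (fun h => hb0 (Nat.eq_zero_of_gcd_eq_zero_left h))
  have hG2 : 2 ≤ G := by
    rcases Nat.lt_or_ge G 2 with h | h
    · interval_cases G <;> simp_all
    · exact h
  rw [PySem.Int.floordiv_eq_ediv_of_pos (by exact_mod_cast hGpos)]
  have h2 : (2:Int) ≤ (G : Int) := by exact_mod_cast hG2
  have : b / (G : Int) < b := by
    apply Int.ediv_lt_of_lt_mul (by omega)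
    nlinarith
  omega

def solve_alt (a : Int) (b : Int) : Bool :=
  if 1 < b then
    let g : Int := ((gcdLoop a.natAbs b.natAbs : Nat) : Int)
    if g = 1 then false
    else solve_alt a (PySem.Int.floordiv b g)
  else true
termination_by b.toNat
decreasing_by exact solve_alt_dec a b (by assumption) (by assumption)

-- ===== PRECONDITION & SPEC =====
def Spec_solve (a : Int) (b : Int) (out : Bool) : Prop := out = solve_alt a b
instance (a : Int) (b : Int) (out : Bool) : Decidable (Spec_solve a b out) := by unfold Spec_solve; infer_instance

-- ===== CLAIM (what is proved, stated in full; the proofs are below) =====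
def Claim_equal_solve : Prop := ∀ (a : Int) (b : Int), Dom_solve a b → Spec_solve a b (solve a b)

-- ===== LEMMAS AND PROOFS =====

-- the common specification: every prime factor of b divides a
def AllPrimeDvd (a b : Int) : Prop := ∀ p : ℕ, p.Prime → (p : ℤ) ∣ b → (p : ℤ) ∣ a

-- divisor-count characterization of primality
theorem countP_divisors_eq_two_iff (m : ℕ) (hm : 2 ≤ m) :
    (List.range m).countP (fun k => decide ((1+k) ∣ m)) = 2 ↔ m.Prime := by
  have hbridge : (List.range m).countP (fun k => decide ((1+k) ∣ m))
      = ((Finset.range m).filter (fun k => (1+k) ∣ m)).card := by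
    simp [Finset.filter, Finset.range, Multiset.filter, List.countP_eq_length_filter,
      Multiset.range]
  rw [hbridge]
  constructor
  · intro h
    by_contra hnp
    obtain ⟨d, hdvd, hd2, hdm⟩ := Nat.exists_dvd_of_not_prime2 hm hnp
    have hsub : ({0, d-1, m-1} : Finset ℕ) ⊆ (Finset.range m).filter (fun k => (1+k) ∣ m) := by
      intro k hk
      simp only [Finset.mem_insert, Finset.mem_singleton] at hk
      simp only [Finset.mem_filter, Finset.mem_range]
      rcases hk with rfl | rfl | rfl
      · exact ⟨by omega, by simpa using Nat.one_dvd m⟩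
      · refine ⟨by omega, ?_⟩
        have he : 1 + (d-1) = d := by omega
        rw [he]; exact hdvd
      · refine ⟨by omega, ?_⟩
        have he : 1 + (m-1) = m := by omega
        rw [he]
    have hcard : ({0, d-1, m-1} : Finset ℕ).card = 3 := by
      rw [Finset.card_insert_of_notMem (by simp; omega),
        Finset.card_insert_of_notMem (by simp; omega), Finset.card_singleton]
    have := Finset.card_le_card hsub
    omega
  · intro hp
    have heq : (Finset.range m).filter (fun k => (1+k) ∣ m) = {0, m-1} := by
      ext k
      simp only [Finset.mem_filter, Finset.mem_range, Finset.mem_insert, Finset.mem_singleton]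
      constructor
      · rintro ⟨hk, hdvd⟩
        rcases hp.eq_one_or_self_of_dvd _ hdvd with h | h <;> omega
      · rintro (rfl | rfl)
        · exact ⟨by omega, by simpa using Nat.one_dvd m⟩
        · refine ⟨by omega, ?_⟩
          have he : 1 + (m-1) = m := by omega
          rw [he]
    rw [heq, Finset.card_insert_of_notMem (by simp; omega), Finset.card_singleton]

theorem is_prime_eq (n : Int) (hn : 1 ≤ n) : is_prime n = true ↔ n.toNat.Prime := by
  by_cases h1 : n = 1
  · subst h1; simp [is_prime, Nat.not_prime_one]
  · have hn2 : 2 ≤ n := by omega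
    set m := n.toNat with hm
    have hnm : n = (m:ℤ) := by omega
    unfold is_prime
    rw [if_neg (by simpa using h1)]
    show (if ((PySem.List.pyRange 1 (n+1) 1).foldl
        (fun acc i => if PySem.Int.mod n i == 0 then acc + 1 else acc) 0 == 2) then true
      else false) = true ↔ m.Prime
    rw [PySem.List.foldl_count_if]
    have hcong : (PySem.List.pyRange 1 (n+1) 1).countP (fun i => PySem.Int.mod n i == 0)
        = (List.range m).countP (fun k => decide ((1+k) ∣ m)) := by
      rw [PySem.List.pyRange_one, List.countP_map]
      have hlen : (n + 1 - 1).toNat = m := by omega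
      rw [hlen]
      apply List.countP_congr
      intro k _
      simp only [Function.comp_apply, beq_iff_eq, PySem.Int.mod_eq_zero_iff_dvd,
        decide_eq_true_eq, hnm]
      norm_cast
    rw [hcong, ← countP_divisors_eq_two_iff m (by omega)]
    set c := (List.range m).countP (fun k => decide ((1+k) ∣ m)) with hc
    constructor
    · intro h
      by_contra hne
      have : ((0:ℤ) + (c:ℤ) == 2) = false := by
        simp only [beq_eq_false_iff_ne, ne_eq]
        omega
      rw [this] at h
      simp at h
    · intro h
      have : ((0:ℤ) + (c:ℤ) == 2) = true := by
        simp only [beq_iff_eq]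
        omega
      rw [this]
      simp

theorem solveLoop_eq (a : Int) (l : List Int) :
    solveLoop a l = true ↔ ∀ f ∈ l, PySem.Int.mod a f = 0 := by
  induction l with
  | nil => simp [solveLoop]
  | cons f rest ih => by_cases h : PySem.Int.mod a f = 0 <;> simp [solveLoop, h, ih]

theorem solve_char (a b : Int) (hb : 2 ≤ b) : solve a b = true ↔ AllPrimeDvd a b := by
  unfold solve
  show solveLoop a (((PySem.List.pyRange 1 (b+1) 1).foldl
      (fun acc i => if PySem.Int.mod b i == 0 then acc ++ [i] else acc) []).filter is_prime)
      = true ↔ _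
  rw [PySem.List.foldl_append_if_eq_filter, List.nil_append, solveLoop_eq]
  constructor
  · intro h p hp hpb
    have hp2 := hp.two_le
    have hple : (p:ℤ) ≤ b := Int.le_of_dvd (by omega) hpb
    rw [← PySem.Int.mod_eq_zero_iff_dvd]
    apply h
    rw [List.mem_filter]
    refine ⟨?_, ?_⟩
    · rw [List.mem_filter]
      refine ⟨?_, ?_⟩
      · rw [PySem.List.mem_pyRange_one]
        omega
      · rw [beq_iff_eq, PySem.Int.mod_eq_zero_iff_dvd]
        exact hpb
    · rw [is_prime_eq _ (by omega)]
      simpa using hp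
  · intro h f hf
    rw [List.mem_filter, List.mem_filter] at hf
    obtain ⟨⟨hmem, hdvdb⟩, hpr⟩ := hf
    rw [PySem.List.mem_pyRange_one] at hmem
    have hf1 : 1 ≤ f := hmem.1
    rw [is_prime_eq f hf1] at hpr
    have := h f.toNat hpr (by
      rw [Int.toNat_of_nonneg (by omega)]
      exact (PySem.Int.mod_eq_zero_iff_dvd b f).mp (by simpa using hdvdb))
    rw [PySem.Int.mod_eq_zero_iff_dvd]
    rwa [Int.toNat_of_nonneg (by omega)] at this

theorem solve_alt_step (a x : Int) (hx : 1 < x)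
    (hg : ¬ ((gcdLoop a.natAbs x.natAbs : Nat) : Int) = 1) :
    (PySem.Int.floordiv x ((gcdLoop a.natAbs x.natAbs : Nat) : Int) ≤ 1 ∨
      AllPrimeDvd a (PySem.Int.floordiv x ((gcdLoop a.natAbs x.natAbs : Nat) : Int)))
    ↔ (x ≤ 1 ∨ AllPrimeDvd a x) := by
  rw [gcdLoop_eq] at hg ⊢
  set G : ℕ := Nat.gcd x.natAbs a.natAbs with hGg
  have hG0 : G ≠ 0 := by
    intro h0
    have := Nat.eq_zero_of_gcd_eq_zero_left (hGg ▸ h0)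
    omega
  have hG1 : G ≠ 1 := by
    intro h1
    exact hg (by rw [h1]; norm_num)
  have hG2 : 2 ≤ G := by omega
  have hgx : (G:ℤ) ∣ x := by
    have := Int.natCast_dvd_natCast.mpr (hGg ▸ Nat.gcd_dvd_left x.natAbs a.natAbs)
    rwa [Int.natAbs_of_nonneg (by omega)] at this
  have hga : (G:ℤ) ∣ a := by
    have h1 := Int.natCast_dvd_natCast.mpr (hGg ▸ Nat.gcd_dvd_right x.natAbs a.natAbs)
    exact h1.trans (Int.natAbs_dvd.mpr dvd_rfl)
  have hfd : PySem.Int.floordiv x (G:ℤ) = x / (G:ℤ) :=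
    PySem.Int.floordiv_eq_ediv_of_pos (by exact_mod_cast Nat.pos_of_ne_zero hG0)
  rw [hfd]
  have hq : (G:ℤ) * (x / (G:ℤ)) = x := Int.mul_ediv_cancel' hgx
  have hG2' : (2:ℤ) ≤ (G:ℤ) := by exact_mod_cast hG2
  have hqpos : 1 ≤ x / (G:ℤ) := by nlinarith [hq]
  have hqdvd : (x / (G:ℤ)) ∣ x := ⟨(G:ℤ), by rw [mul_comm]; omega⟩
  constructor
  · rintro (hle | hq')
    · refine Or.inr fun p hp hpx => ?_
      have hxG : x = (G:ℤ) := by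
        have h1 : x / (G:ℤ) = 1 := by omega
        rw [h1, mul_one] at hq
        omega
      exact (hxG ▸ hpx).trans hga
    · refine Or.inr fun p hp hpx => ?_
      by_cases hpa : (p:ℤ) ∣ a
      · exact hpa
      · have hpg : ¬ (p:ℤ) ∣ (G:ℤ) := fun h => hpa (h.trans hga)
        have hprime : Prime (p:ℤ) := Nat.prime_iff_prime_int.mp hp
        have hpmul : (p:ℤ) ∣ (G:ℤ) * (x / (G:ℤ)) := by rw [hq]; exact hpx
        rcases hprime.dvd_mul.mp hpmul with h | h
        · exact absurd h hpg
        · exact hq' p hp h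
  · rintro (hle | h)
    · omega
    · exact Or.inr fun p hp hpq => h p hp (hpq.trans hqdvd)

theorem solve_alt_char (a b : Int) : solve_alt a b = true ↔ (b ≤ 1 ∨ AllPrimeDvd a b) := by
  induction b using solve_alt.induct (a := a) with
  | case1 x hx g hg =>
    have hg' : ((gcdLoop a.natAbs x.natAbs : Nat) : Int) = 1 := hg
    rw [solve_alt, if_pos hx]
    show (if ((gcdLoop a.natAbs x.natAbs : Nat) : Int) = 1 then false
      else solve_alt a (PySem.Int.floordiv x ((gcdLoop a.natAbs x.natAbs : Nat) : Int)))
      = true ↔ _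
    rw [if_pos hg']
    have hG : Nat.gcd x.natAbs a.natAbs = 1 := by
      rw [gcdLoop_eq] at hg'; exact_mod_cast hg'
    obtain ⟨p, hp, hpd⟩ := Nat.exists_prime_and_dvd (show x.natAbs ≠ 1 by omega)
    simp only [Bool.false_eq_true, false_iff]
    rintro (h | h)
    · omega
    · have hpx : (p:ℤ) ∣ x := by
        have := Int.natCast_dvd_natCast.mpr hpd
        rwa [Int.natAbs_of_nonneg (by omega)] at this
      have hpa : p ∣ a.natAbs := Int.natCast_dvd_natCast.mp (Int.dvd_natAbs.mpr (h p hp hpx))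
      have : p ∣ 1 := hG ▸ Nat.dvd_gcd hpd hpa
      exact Nat.Prime.one_lt hp |>.ne' (Nat.dvd_one.mp this)
  | case2 x hx g hg ih =>
    have hg' : ¬ ((gcdLoop a.natAbs x.natAbs : Nat) : Int) = 1 := hg
    rw [solve_alt, if_pos hx]
    show (if ((gcdLoop a.natAbs x.natAbs : Nat) : Int) = 1 then false
      else solve_alt a (PySem.Int.floordiv x ((gcdLoop a.natAbs x.natAbs : Nat) : Int)))
      = true ↔ _
    rw [if_neg hg']
    have ih' : solve_alt a (PySem.Int.floordiv x ((gcdLoop a.natAbs x.natAbs : Nat) : Int)) = true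
        ↔ (PySem.Int.floordiv x ((gcdLoop a.natAbs x.natAbs : Nat) : Int) ≤ 1 ∨
          AllPrimeDvd a (PySem.Int.floordiv x ((gcdLoop a.natAbs x.natAbs : Nat) : Int))) := ih
    exact ih'.trans (solve_alt_step a x hx hg')
  | case3 x hx =>
    rw [solve_alt, if_neg hx]
    simp only [true_iff]
    exact Or.inl (by omega)

theorem solve_true_of_le_one (a b : Int) (hb : b ≤ 1) : solve a b = true := by
  by_cases h1 : b = 1
  · subst h1
    have key : (((PySem.List.pyRange 1 (1+1) 1).foldl
        (fun acc i => if PySem.Int.mod 1 i == 0 then acc ++ [i] else acc) []).filter is_prime)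
        = [] := by decide
    unfold solve
    show solveLoop a (((PySem.List.pyRange 1 (1+1) 1).foldl
        (fun acc i => if PySem.Int.mod 1 i == 0 then acc ++ [i] else acc) []).filter is_prime)
        = true
    rw [key]
    rfl
  · have hnil : b + 1 ≤ 1 := by omega
    simp [solve, PySem.List.pyRange_one_eq_nil hnil, solveLoop]

-- ===== VERDICT (by name: the statement is the Claim_ definition above) =====
theorem solve_spec : Claim_equal_solve := by
  intro a b _
  unfold Spec_solve
  rcases (by omega : b ≤ 1 ∨ 1 < b) with hb | hb
  · rw [solve_true_of_le_one a b hb, solve_alt, if_neg (by omega)]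
  · rw [Bool.eq_iff_iff, solve_char a b (by omega), solve_alt_char]
    constructor
    · exact Or.inr
    · rintro (h | h); · omega
      · exact h
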